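-- pv_equiv track=rewrite | github.com/serna01/yob | yob.py | getIntersecTopN
-- ===== SOURCE A (Python) =====
-- from collections import Counter
--
-- def getIntersecTopN(inicial,final,test_hv,test_job):
--     #saca el numero de palabras comunes a los 2 textos en el intervalo determinado
--     counts_hv = Counter(test_hv)
--     counts_job = Counter(test_job)
--     mchI = counts_hv.most_common(inicial)
--     mcjI = counts_job.most_common(inicial)
--     mchF = counts_hv.most_common(final)
--     mcjF = counts_job.most_common(final)
--
--     mch=set(mchF)-set(mchI)
--     mcj=set(mcjF)-set(mcjI)
--
--     toph=[]
--     topj=[]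
--     for i in mch:
--         toph.append(i[0])
--     for i in mcj:
--         topj.append(i[0])
--     interTop=set(toph) & set(topj)
--     return len(interTop)
-- ===== SOURCE B (Python) =====
-- from collections import Counter
--
-- def getIntersecTopN(inicial, final, test_hv, test_job):
--     # Rank each text's words once (count desc, first-seen order for ties),
--     # take the [inicial:final) rank window as a set, and intersect.
--     lo, hi = max(inicial, 0), max(final, 0)
--
--     def window(words):
--         ranked = [w for w, _ in Counter(words).most_common()]
--         return set(ranked[lo:hi])
--
--     return len(window(test_hv) & window(test_job))
-- ===== Notes on version B (the rewrite author's own statement) =====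
-- stated objective: simpler
-- what changed: B ranks each text's words once with a single most_common() call and takes the [inicial:final) rank window by a clamped slice, replacing A's four most_common calls, two (word,count)-pair set differences and two explicit append loops; the windows are intersected directly.
import Mathlib
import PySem

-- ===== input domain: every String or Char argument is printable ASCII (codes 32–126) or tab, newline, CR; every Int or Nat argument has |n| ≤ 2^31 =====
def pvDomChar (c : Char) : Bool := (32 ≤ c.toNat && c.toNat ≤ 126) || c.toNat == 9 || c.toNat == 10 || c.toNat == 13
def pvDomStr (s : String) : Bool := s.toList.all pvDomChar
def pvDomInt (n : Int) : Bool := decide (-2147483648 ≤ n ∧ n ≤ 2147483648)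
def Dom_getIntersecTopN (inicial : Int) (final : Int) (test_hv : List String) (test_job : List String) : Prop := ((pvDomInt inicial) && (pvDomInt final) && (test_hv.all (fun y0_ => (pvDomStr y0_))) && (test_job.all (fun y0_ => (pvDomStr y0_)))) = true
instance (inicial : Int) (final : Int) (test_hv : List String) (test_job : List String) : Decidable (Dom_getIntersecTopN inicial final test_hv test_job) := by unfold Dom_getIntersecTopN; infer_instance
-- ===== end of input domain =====

-- B replaces A's four most_common calls, two pair-set differences and two append
-- loops by one ranked word list per text, a slice of it, and one set intersection
-- (objective: simpler — same result on every input, both are total).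

-- ===== PORT A =====
-- Counter.most_common(n): items sorted count-descending (ties in first-encounter
-- order, Python's stable reverse sort), truncated at n; empty for n ≤ 0 (heapq.nlargest).
def pyMostCommon (d : PySem.Dict String Int) (n : Int) : List (String × Int) :=
  (PySem.List.sorted d.items (fun p => p.2) true).take n.toNat

def getIntersecTopN (inicial : Int) (final : Int) (test_hv : List String) (test_job : List String) : Int :=
  let counts_hv := PySem.Dict.counter test_hv
  let counts_job := PySem.Dict.counter test_job
  let mchI := pyMostCommon counts_hv inicial
  let mcjI := pyMostCommon counts_job inicial
  let mchF := pyMostCommon counts_hv final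
  let mcjF := pyMostCommon counts_job final
  let mch := PySem.Set.diff (PySem.Set.ofList mchF) (PySem.Set.ofList mchI)
  let mcj := PySem.Set.diff (PySem.Set.ofList mcjF) (PySem.Set.ofList mcjI)
  let toph := mch.foldl (fun acc i => acc ++ [i.1]) ([] : List String)
  let topj := mcj.foldl (fun acc i => acc ++ [i.1]) ([] : List String)
  let interTop := PySem.Set.inter (PySem.Set.ofList toph) (PySem.Set.ofList topj)
  (interTop.length : Int)

-- ===== PORT B =====
-- ranked word list of a text (Counter(words).most_common() order), then the
-- rank window [lo:hi] as a set
def rankedWindow (lo : Int) (hi : Int) (words : List String) : PySem.Set String :=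
  let ranked := (PySem.List.sorted (PySem.Dict.counter words).items (fun p => p.2) true).map (fun p => p.1)
  PySem.Set.ofList (PySem.List.slice ranked (some lo) (some hi))

def getIntersecTopN_alt (inicial : Int) (final : Int) (test_hv : List String) (test_job : List String) : Int :=
  let lo := max inicial 0
  let hi := max final 0
  ((PySem.Set.inter (rankedWindow lo hi test_hv) (rankedWindow lo hi test_job)).length : Int)

-- ===== PRECONDITION & SPEC =====
def Spec_getIntersecTopN (inicial : Int) (final : Int) (test_hv : List String) (test_job : List String) (out : Int) : Prop := out = getIntersecTopN_alt inicial final test_hv test_job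
instance (inicial : Int) (final : Int) (test_hv : List String) (test_job : List String) (out : Int) : Decidable (Spec_getIntersecTopN inicial final test_hv test_job out) := by unfold Spec_getIntersecTopN; infer_instance

-- ===== CLAIM (what is proved, stated in full; the proofs are below) =====
def Claim_equal_getIntersecTopN : Prop := ∀ (inicial : Int) (final : Int) (test_hv : List String) (test_job : List String), Dom_getIntersecTopN inicial final test_hv test_job → Spec_getIntersecTopN inicial final test_hv test_job (getIntersecTopN inicial final test_hv test_job)

-- ===== LEMMAS AND PROOFS =====

-- the ranked item list of a Counter has no duplicate entries
lemma nodup_sorted_counter (ws : List String) :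
    (PySem.List.sorted (PySem.Dict.counter ws).items (fun p => p.2) true).Nodup := by
  apply (PySem.List.sorted_perm _ _ _).nodup_iff.mpr
  rw [PySem.Dict.items_counter]
  exact (PySem.Set.nodup_ofList ws).map (fun a b h => by simpa using congrArg Prod.fst h)

-- set difference of two prefixes of a duplicate-free list is the in-between segment
lemma diff_take_take {α : Type} [BEq α] [LawfulBEq α] (l : List α) (hnd : l.Nodup)
    (I F : Nat) :
    PySem.Set.diff (PySem.Set.ofList (l.take F)) (PySem.Set.ofList (l.take I))
      = (l.take F).drop I := by
  rw [PySem.Set.ofList_eq_self_of_nodup (l.take F) (hnd.sublist (List.take_sublist F l)),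
    PySem.Set.diff]
  have h1 : List.filter (fun x => !(PySem.Set.ofList (l.take I)).contains x)
      (List.take I (l.take F)) = [] := by
    apply List.filter_eq_nil_iff.mpr
    intro x hx
    rw [List.take_take] at hx
    have hmin : min (min I F) I = min I F := by omega
    have hx2 : x ∈ List.take (min I F) (List.take I l) := by
      rw [List.take_take, hmin]; exact hx
    have hx' : x ∈ l.take I := List.take_subset _ _ hx2
    simp [PySem.Set.contains, PySem.Set.mem_ofList, hx']
  have h2 : List.filter (fun x => !(PySem.Set.ofList (l.take I)).contains x)
      (List.drop I (l.take F)) = List.drop I (l.take F) := by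
    apply List.filter_eq_self.mpr
    intro x hx
    have hx' : x ∈ l.drop I := by
      rw [List.drop_take] at hx
      exact List.take_subset _ _ hx
    have hnot : x ∉ l.take I := fun hmem => (List.disjoint_take_drop hnd le_rfl) hmem hx'
    simp [PySem.Set.contains, PySem.Set.mem_ofList, hnot]
  conv_lhs => rw [← List.take_append_drop I (l.take F)]
  rw [List.filter_append, h1, h2, List.nil_append]

-- a Python slice with clamped non-negative bounds is drop-inside-take
lemma slice_max_zero {α : Type} (l : List α) (i f : Int) :
    PySem.List.slice l (some (max i 0)) (some (max f 0)) = (l.take f.toNat).drop i.toNat := by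
  have hi : max i 0 = ((i.toNat : Nat) : Int) := by omega
  have hf : max f 0 = ((f.toNat : Nat) : Int) := by omega
  rw [hi, hf, PySem.List.slice_natCast, List.drop_take]

-- per-text: A's word list (set difference of the two most_common prefixes)
-- IS B's rank-window slice
lemma window_eq (i f : Int) (ws : List String) :
    (PySem.Set.diff (PySem.Set.ofList (pyMostCommon (PySem.Dict.counter ws) f))
        (PySem.Set.ofList (pyMostCommon (PySem.Dict.counter ws) i))).foldl
      (fun acc p => acc ++ [p.1]) ([] : List String)
    = PySem.List.slice
        ((PySem.List.sorted (PySem.Dict.counter ws).items (fun p => p.2) true).map (fun p => p.1))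
        (some (max i 0)) (some (max f 0)) := by
  rw [slice_max_zero, PySem.List.foldl_append_singleton_eq_map, List.nil_append]
  rw [pyMostCommon, pyMostCommon,
    diff_take_take _ (nodup_sorted_counter ws) i.toNat f.toNat]
  rw [List.map_drop, List.map_take]

-- ===== VERDICT (by name: the statement is the Claim_ definition above) =====
theorem getIntersecTopN_spec : Claim_equal_getIntersecTopN := by
  intro inicial final test_hv test_job _
  show getIntersecTopN inicial final test_hv test_job = _
  simp only [getIntersecTopN, getIntersecTopN_alt, rankedWindow]
  rw [window_eq inicial final test_hv, window_eq inicial final test_job]
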